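-- pv_equiv track=rewrite | github.com/ddaanet/edify | src/edify/statusline/api_usage.py | aggregate_by_tier
-- ===== SOURCE A (Python) =====
-- def aggregate_by_tier(tokens_by_model: dict[str, int]) -> dict[str, int]:
--     """Aggregate token counts by model tier using keyword matching.
--
--     Args:
--         tokens_by_model: Dictionary mapping model names to token counts.
--
--     Returns:
--         Dictionary with 'opus', 'sonnet', 'haiku' keys containing aggregated counts.
--     """
--     result = {"opus": 0, "sonnet": 0, "haiku": 0}
--
--     for model_name, tokens in tokens_by_model.items():
--         if "opus" in model_name.lower():
--             result["opus"] += tokens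
--         elif "sonnet" in model_name.lower():
--             result["sonnet"] += tokens
--         elif "haiku" in model_name.lower():
--             result["haiku"] += tokens
--
--     return result
-- ===== SOURCE B (Python) =====
-- TIERS = ("opus", "sonnet", "haiku")
--
--
-- def _tier_of(model_name):
--     """First tier keyword contained in the lowercased name, or None."""
--     lower = model_name.lower()
--     return next((t for t in TIERS if t in lower), None)
--
--
-- def aggregate_by_tier(tokens_by_model: dict[str, int]) -> dict[str, int]:
--     """Classify each model into a tier, then sum tokens per tier."""
--     return {
--         t: sum(tokens for name, tokens in tokens_by_model.items() if _tier_of(name) == t)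
--         for t in TIERS
--     }
-- ===== Notes on version B (the rewrite author's own statement) =====
-- stated objective: idiomatic
-- what changed: Replaces the single loop with an if/elif chain of conditional increments by a 'classify then aggregate' decomposition: a helper finds the first matching tier keyword, and a dict comprehension sums tokens per tier in three passes.
import Mathlib
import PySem

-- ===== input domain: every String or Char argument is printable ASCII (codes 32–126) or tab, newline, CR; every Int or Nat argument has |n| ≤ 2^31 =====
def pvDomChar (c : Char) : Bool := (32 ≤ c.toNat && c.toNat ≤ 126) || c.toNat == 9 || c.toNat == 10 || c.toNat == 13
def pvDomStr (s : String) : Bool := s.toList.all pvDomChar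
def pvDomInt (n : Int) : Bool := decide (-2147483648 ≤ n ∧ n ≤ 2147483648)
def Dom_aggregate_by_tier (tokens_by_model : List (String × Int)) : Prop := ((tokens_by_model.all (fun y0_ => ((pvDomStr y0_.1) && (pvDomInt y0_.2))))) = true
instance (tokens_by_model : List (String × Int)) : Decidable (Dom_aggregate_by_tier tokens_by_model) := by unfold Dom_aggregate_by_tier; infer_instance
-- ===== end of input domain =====

-- B replaces A's single loop with an if/elif increment chain by a data-driven
-- "classify then aggregate" decomposition (first-matching-tier helper + per-tier sums); idiomatic, same cost.

-- ===== PORT A =====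
def aggregate_by_tier (tokens_by_model : List (String × Int)) : List (String × Int) :=
  (tokens_by_model.foldl (fun result p =>
      if PySem.Str.isIn "opus" (PySem.Str.lower p.1) then
        result.modify "opus" 0 (· + p.2)
      else if PySem.Str.isIn "sonnet" (PySem.Str.lower p.1) then
        result.modify "sonnet" 0 (· + p.2)
      else if PySem.Str.isIn "haiku" (PySem.Str.lower p.1) then
        result.modify "haiku" 0 (· + p.2)
      else result)
    (PySem.Dict.ofList [("opus", 0), ("sonnet", 0), ("haiku", 0)])).items

-- ===== PORT B =====
-- next((t for t in TIERS if t in lower), None)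
def tierOf (model_name : String) : Option String :=
  let lower := PySem.Str.lower model_name
  ["opus", "sonnet", "haiku"].find? (fun t => PySem.Str.isIn t lower)

def aggregate_by_tier_alt (tokens_by_model : List (String × Int)) : List (String × Int) :=
  ["opus", "sonnet", "haiku"].map (fun t =>
    (t, ((tokens_by_model.filter (fun p => tierOf p.1 == some t)).map (·.2)).sum))

-- ===== PRECONDITION & SPEC =====
def Spec_aggregate_by_tier (tokens_by_model : List (String × Int)) (out : List (String × Int)) : Prop := out = aggregate_by_tier_alt tokens_by_model
instance (tokens_by_model : List (String × Int)) (out : List (String × Int)) : Decidable (Spec_aggregate_by_tier tokens_by_model out) := by unfold Spec_aggregate_by_tier; infer_instance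

-- ===== CLAIM (what is proved, stated in full; the proofs are below) =====
def Claim_equal_aggregate_by_tier : Prop := ∀ (tokens_by_model : List (String × Int)), Dom_aggregate_by_tier tokens_by_model → Spec_aggregate_by_tier tokens_by_model (aggregate_by_tier tokens_by_model)

-- ===== LEMMAS AND PROOFS =====

-- sum of tokens classified into tier t
def tierSum (t : String) (l : List (String × Int)) : Int :=
  ((l.filter (fun p => tierOf p.1 == some t)).map (·.2)).sum

theorem tierSum_cons (t : String) (x : String × Int) (xs : List (String × Int)) :
    tierSum t (x :: xs) = (if tierOf x.1 = some t then x.2 else 0) + tierSum t xs := by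
  simp only [tierSum, List.filter_cons, beq_iff_eq]
  split_ifs with h <;> simp

theorem aggregate_loop_items (l : List (String × Int)) (o s h : Int) :
    (l.foldl (fun result p =>
      if PySem.Str.isIn "opus" (PySem.Str.lower p.1) then
        result.modify "opus" 0 (· + p.2)
      else if PySem.Str.isIn "sonnet" (PySem.Str.lower p.1) then
        result.modify "sonnet" 0 (· + p.2)
      else if PySem.Str.isIn "haiku" (PySem.Str.lower p.1) then
        result.modify "haiku" 0 (· + p.2)
      else result)
      (PySem.Dict.mk [("opus", o), ("sonnet", s), ("haiku", h)])).items
    = [("opus", o + tierSum "opus" l), ("sonnet", s + tierSum "sonnet" l),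
       ("haiku", h + tierSum "haiku" l)] := by
  induction l generalizing o s h with
  | nil => simp [tierSum]
  | cons x xs ih =>
    simp only [List.foldl_cons]
    by_cases ho : PySem.Str.isIn "opus" (PySem.Str.lower x.1) = true
    · have ho2 : PySem.Chars.isIn ['o','p','u','s'] (PySem.Chars.lower x.1.toList) = true := by simpa using ho
      have ht : tierOf x.1 = some "opus" := by simp [tierOf, List.find?, ho2]
      rw [if_pos ho]
      have hd : (PySem.Dict.mk [("opus", o), ("sonnet", s), ("haiku", h)]).modify "opus" 0 (· + x.2)
          = PySem.Dict.mk [("opus", o + x.2), ("sonnet", s), ("haiku", h)] := by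
        simp [PySem.Dict.modify, PySem.Dict.getD, PySem.Dict.get?, PySem.Dict.insert,
          PySem.Dict.contains]
      rw [hd, ih]
      simp [tierSum_cons, ht]
      try omega
    · rw [if_neg ho]
      by_cases hs : PySem.Str.isIn "sonnet" (PySem.Str.lower x.1) = true
      · have ho2 : ¬ PySem.Chars.isIn ['o','p','u','s'] (PySem.Chars.lower x.1.toList) = true := by simpa using ho
        have hs2 : PySem.Chars.isIn ['s','o','n','n','e','t'] (PySem.Chars.lower x.1.toList) = true := by simpa using hs
        have ht : tierOf x.1 = some "sonnet" := by simp [tierOf, List.find?, ho2, hs2]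
        rw [if_pos hs]
        have hd : (PySem.Dict.mk [("opus", o), ("sonnet", s), ("haiku", h)]).modify "sonnet" 0 (· + x.2)
            = PySem.Dict.mk [("opus", o), ("sonnet", s + x.2), ("haiku", h)] := by
          simp [PySem.Dict.modify, PySem.Dict.getD, PySem.Dict.get?, PySem.Dict.insert,
            PySem.Dict.contains]
        rw [hd, ih]
        simp [tierSum_cons, ht]
        try omega
      · rw [if_neg hs]
        by_cases hh : PySem.Str.isIn "haiku" (PySem.Str.lower x.1) = true
        · have ho2 : ¬ PySem.Chars.isIn ['o','p','u','s'] (PySem.Chars.lower x.1.toList) = true := by simpa using ho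
          have hs2 : ¬ PySem.Chars.isIn ['s','o','n','n','e','t'] (PySem.Chars.lower x.1.toList) = true := by simpa using hs
          have hh2 : PySem.Chars.isIn ['h','a','i','k','u'] (PySem.Chars.lower x.1.toList) = true := by simpa using hh
          have ht : tierOf x.1 = some "haiku" := by simp [tierOf, List.find?, ho2, hs2, hh2]
          rw [if_pos hh]
          have hd : (PySem.Dict.mk [("opus", o), ("sonnet", s), ("haiku", h)]).modify "haiku" 0 (· + x.2)
              = PySem.Dict.mk [("opus", o), ("sonnet", s), ("haiku", h + x.2)] := by
            simp [PySem.Dict.modify, PySem.Dict.getD, PySem.Dict.get?, PySem.Dict.insert,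
              PySem.Dict.contains]
          rw [hd, ih]
          simp [tierSum_cons, ht]
          try omega
        · have ho2 : ¬ PySem.Chars.isIn ['o','p','u','s'] (PySem.Chars.lower x.1.toList) = true := by simpa using ho
          have hs2 : ¬ PySem.Chars.isIn ['s','o','n','n','e','t'] (PySem.Chars.lower x.1.toList) = true := by simpa using hs
          have hh2 : ¬ PySem.Chars.isIn ['h','a','i','k','u'] (PySem.Chars.lower x.1.toList) = true := by simpa using hh
          have ht : tierOf x.1 = none := by simp [tierOf, List.find?, ho2, hs2, hh2]
          rw [if_neg hh, ih]
          simp [tierSum_cons, ht]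

-- ===== VERDICT (by name: the statement is the Claim_ definition above) =====
theorem aggregate_by_tier_spec : Claim_equal_aggregate_by_tier := by
  intro l _
  unfold Spec_aggregate_by_tier aggregate_by_tier aggregate_by_tier_alt
  rw [show PySem.Dict.ofList [("opus", (0:Int)), ("sonnet", 0), ("haiku", 0)]
      = PySem.Dict.mk [("opus", 0), ("sonnet", 0), ("haiku", 0)] from by decide]
  rw [aggregate_loop_items]
  simp [tierSum]
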